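-- pv_equiv track=rewrite | github.com/venkateswarlu589/Datastructures-and-Algorithms | 1716-calculate-money-in-leetcode-bank/1716-calculate-money-in-leetcode-bank.py | totalMoney
-- ===== SOURCE A (Python) =====
-- def totalMoney(n: int) -> int:
--     sum = 1
--     total = 1
--     sol =0
--     for i in range(1,n+1):
--         sol += total
--         total += 1
--         if i % 7 == 0:
--             sum += 1
--             total = sum
--     return sol
-- ===== SOURCE B (Python) =====
-- def totalMoney(n: int) -> int:
--     # Closed form: full weeks contribute 28, 35, 42, ...; leftover days start at w+1.
--     if n <= 0:
--         return 0
--     w, r = divmod(n, 7)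
--     return 28 * w + 7 * (w * (w - 1)) // 2 + r * (w + 1) + r * (r - 1) // 2
-- ===== Notes on version B (the rewrite author's own statement) =====
-- stated objective: faster
-- what changed: Replaced the day-by-day simulation loop with a closed-form arithmetic-series formula over full weeks plus the leftover days.
import Mathlib
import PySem

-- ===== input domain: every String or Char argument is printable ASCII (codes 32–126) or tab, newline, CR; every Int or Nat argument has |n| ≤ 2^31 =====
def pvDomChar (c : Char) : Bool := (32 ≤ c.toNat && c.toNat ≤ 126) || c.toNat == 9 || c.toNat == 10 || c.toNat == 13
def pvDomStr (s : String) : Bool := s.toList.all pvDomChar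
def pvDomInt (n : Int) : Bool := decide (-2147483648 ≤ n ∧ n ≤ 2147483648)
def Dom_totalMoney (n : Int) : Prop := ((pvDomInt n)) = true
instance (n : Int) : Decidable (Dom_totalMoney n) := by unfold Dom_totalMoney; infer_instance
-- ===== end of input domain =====

-- B replaces A's day-by-day simulation loop with a closed-form arithmetic-series formula (faster).

-- ===== PORT A =====
-- loop body of A: state (sum, total, sol), loop variable i
def stepA (s : Int × Int × Int) (i : Int) : Int × Int × Int :=
  let sum := s.1
  let total := s.2.1
  let sol := s.2.2 + total
  let total := total + 1
  if PySem.Int.mod i 7 == 0 then (sum + 1, sum + 1, sol) else (sum, total, sol)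

def totalMoney (n : Int) : Int :=
  ((PySem.List.pyRange 1 (n + 1) 1).foldl stepA (1, 1, 0)).2.2

-- ===== PORT B =====
def totalMoney_alt (n : Int) : Int :=
  if n ≤ 0 then 0
  else
    let w := PySem.Int.floordiv n 7
    let r := PySem.Int.mod n 7
    28 * w + PySem.Int.floordiv (7 * (w * (w - 1))) 2 + r * (w + 1) + PySem.Int.floordiv (r * (r - 1)) 2

-- ===== PRECONDITION & SPEC =====
def Spec_totalMoney (n : Int) (out : Int) : Prop := out = totalMoney_alt n
instance (n : Int) (out : Int) : Decidable (Spec_totalMoney n out) := by unfold Spec_totalMoney; infer_instance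

-- ===== CLAIM (what is proved, stated in full; the proofs are below) =====
def Claim_equal_totalMoney : Prop := ∀ (n : Int), Dom_totalMoney n → Spec_totalMoney n (totalMoney n)

-- ===== LEMMAS AND PROOFS =====

-- triangular-number helper: T m = m*(m-1) // 2
def T (m : Int) : Int := PySem.Int.floordiv (m * (m - 1)) 2

theorem T_succ (m : Int) : T (m + 1) = T m + m := by
  simp only [T, PySem.Int.floordiv_eq_ediv_of_pos (by norm_num : (0:Int) < 2)]
  rw [show (m + 1) * ((m + 1) - 1) = m * (m - 1) + m * 2 by ring]
  rw [Int.add_mul_ediv_right _ _ (by norm_num : (2:Int) ≠ 0)]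

theorem two_dvd_pred_mul (w : Int) : (2:Int) ∣ w * (w - 1) := by
  have h := Int.even_mul_succ_self (w - 1)
  rw [show (w - 1) + 1 = w by ring] at h
  simpa [mul_comm] using h.two_dvd

theorem sevenT (w : Int) : PySem.Int.floordiv (7 * (w * (w - 1))) 2 = 7 * T w := by
  simp only [T, PySem.Int.floordiv_eq_ediv_of_pos (by norm_num : (0:Int) < 2)]
  exact Int.mul_ediv_assoc 7 (two_dvd_pred_mul w)

-- loop invariant of A after k days: sum = 1 + k/7, total = 1 + k/7 + k%7, sol = closed form
theorem loopA (k : Nat) :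
    (PySem.List.pyRange 1 ((k : Int) + 1) 1).foldl stepA (1, 1, 0)
      = (1 + (k : Int) / 7,
         (1 + (k : Int) / 7 + (k : Int) % 7,
          28 * ((k : Int) / 7) + 7 * T ((k : Int) / 7)
            + ((k : Int) % 7) * ((k : Int) / 7 + 1) + T ((k : Int) % 7))) := by
  induction k with
  | zero =>
    rw [PySem.List.pyRange_one_eq_nil (by norm_num)]
    simp [T]
  | succ k ih =>
    have hcast : ((k + 1 : Nat) : Int) = (k : Int) + 1 := by push_cast; ring
    rw [hcast, PySem.List.pyRange_one_succ_right (by omega), List.foldl_append, ih]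
    simp only [List.foldl, stepA, PySem.Int.mod_eq_emod_of_pos (by norm_num : (0:Int) < 7)]
    by_cases h : ((k : Int) + 1) % 7 = 0
    · have h6 : (k : Int) % 7 = 6 := by omega
      have hq : ((k : Int) + 1) / 7 = (k : Int) / 7 + 1 := by omega
      rw [hq, h, h6]
      simp only [beq_self_eq_true, if_true, Prod.mk.injEq]
      refine ⟨by ring, by ring, ?_⟩
      rw [T_succ]
      have h15 : T 6 = 15 := by decide
      have h0 : T 0 = 0 := by decide
      rw [h15, h0]
      ring
    · have hq : ((k : Int) + 1) / 7 = (k : Int) / 7 := by omega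
      have hm : ((k : Int) + 1) % 7 = (k : Int) % 7 + 1 := by omega
      rw [hq, hm]
      have hb : (((k : Int) % 7 + 1 : Int) == 0) = false := by
        rw [beq_eq_false_iff_ne]; omega
      rw [hb]
      simp only [Bool.false_eq_true, if_false, Prod.mk.injEq]
      refine ⟨trivial, by ring, ?_⟩
      rw [T_succ]
      ring

-- ===== VERDICT (by name: the statement is the Claim_ definition above) =====
theorem totalMoney_spec : Claim_equal_totalMoney := by
  intro n _
  unfold Spec_totalMoney totalMoney totalMoney_alt
  by_cases hn : n ≤ 0
  · rw [PySem.List.pyRange_one_eq_nil (by omega), if_pos hn]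
    rfl
  · have hk : ((n.toNat : Nat) : Int) = n := Int.toNat_of_nonneg (by omega)
    rw [if_neg hn]
    conv_lhs => rw [← hk]
    rw [loopA]
    show _ = 28 * PySem.Int.floordiv n 7
        + PySem.Int.floordiv (7 * (PySem.Int.floordiv n 7 * (PySem.Int.floordiv n 7 - 1))) 2
        + PySem.Int.mod n 7 * (PySem.Int.floordiv n 7 + 1)
        + PySem.Int.floordiv (PySem.Int.mod n 7 * (PySem.Int.mod n 7 - 1)) 2
    rw [sevenT, PySem.Int.floordiv_eq_ediv_of_pos (by norm_num : (0:Int) < 7),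
        PySem.Int.mod_eq_emod_of_pos (by norm_num : (0:Int) < 7), hk]
    rfl
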